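-- pv_equiv track=rewrite | github.com/botlyz/BTYZ | src/opti.py | _chunk_grid
-- ===== SOURCE A (Python) =====
-- def _chunk_grid(grid, max_combos=1500):
--     """Découpe une grille en sous-grilles de max_combos combos.
--     Chunke récursivement si un seul paramètre ne suffit pas."""
--
--     n_combos = 1
--     for v in grid.values():
--         n_combos *= len(v)
--
--     if n_combos <= max_combos:
--         return [grid]
--
--     # Trier les params par nombre de valeurs décroissant
--     sorted_keys = sorted(grid.keys(), key=lambda k: len(grid[k]), reverse=True)
--
--     # Chunker sur le plus gros param
--     chunk_key = sorted_keys[0]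
--     chunk_vals = grid[chunk_key]
--     other_combos = n_combos // len(chunk_vals)
--
--     vals_per_chunk = max(1, max_combos // other_combos)
--     chunks = []
--     for i in range(0, len(chunk_vals), vals_per_chunk):
--         sub_grid = dict(grid)
--         sub_grid[chunk_key] = chunk_vals[i:i + vals_per_chunk]
--
--         # Vérifier si le sous-chunk est encore trop gros → récursion
--         sub_n = 1
--         for v in sub_grid.values():
--             sub_n *= len(v)
--         if sub_n > max_combos:
--             chunks.extend(_chunk_grid(sub_grid, max_combos))
--         else:
--             chunks.append(sub_grid)
--
--     return chunks
-- ===== SOURCE B (Python) =====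
-- def _chunk_grid(grid, max_combos=1500):
--     """Iterative worklist version: pop a grid; if its combo product fits, emit it,
--     otherwise pick the largest parameter as the head of the size-sorted item list,
--     pre-cut its values into per-sized pieces with a while loop, and push the
--     rebuilt sub-grids back in reverse so they are popped in ascending order."""
--     out = []
--     stack = [grid]
--     while stack:
--         g = stack.pop()
--         n = 1
--         for kv in g.items():
--             n *= len(kv[1])
--         if n <= max_combos:
--             out.append(g)
--             continue
--         ck, vals = sorted(g.items(), key=lambda kv: len(kv[1]), reverse=True)[0]
--         per = max(1, max_combos // (n // len(vals)))
--         pieces = []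
--         rest = vals
--         while rest:
--             pieces.append(rest[:per])
--             rest = rest[per:]
--         for piece in reversed(pieces):
--             stack.append({k: (piece if k == ck else v) for k, v in g.items()})
--     return out
-- ===== Notes on version B (the rewrite author's own statement) =====
-- stated objective: alternative
-- what changed: The recursion becomes an explicit LIFO worklist loop, the split parameter is taken as the head of the size-sorted item list instead of a sorted-keys lookup, the value list is pre-cut into per-sized pieces by a while loop instead of indexed range slicing, and each sub-grid is rebuilt by a dict comprehension instead of copy-and-assign; sub-grids are pushed in reverse so pop order matches A's depth-first output.
import Mathlib
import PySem

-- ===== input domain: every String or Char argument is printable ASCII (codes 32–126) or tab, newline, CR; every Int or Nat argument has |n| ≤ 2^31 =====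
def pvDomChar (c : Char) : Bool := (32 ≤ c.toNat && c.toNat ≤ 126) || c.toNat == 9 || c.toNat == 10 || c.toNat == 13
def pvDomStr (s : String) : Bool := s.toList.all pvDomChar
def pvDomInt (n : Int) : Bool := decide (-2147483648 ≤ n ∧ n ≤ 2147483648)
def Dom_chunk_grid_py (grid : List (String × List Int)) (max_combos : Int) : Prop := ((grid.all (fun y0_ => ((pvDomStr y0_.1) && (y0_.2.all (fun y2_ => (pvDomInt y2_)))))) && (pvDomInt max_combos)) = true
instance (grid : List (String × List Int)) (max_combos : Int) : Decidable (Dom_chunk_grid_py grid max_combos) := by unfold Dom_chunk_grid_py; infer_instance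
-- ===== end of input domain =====

-- ===== PORT A =====
-- B replaces A's recursion by an explicit LIFO worklist, selects the split parameter as the head of the
-- size-sorted ITEM list (no key lookup), pre-cuts the values with a while loop and rebuilds each sub-grid
-- by a dict comprehension; equal return values proved on Pre_.
def pvCombos (d : PySem.Dict String (List Int)) : Int :=
  d.values.foldl (fun n v => n * PySem.List.len v) 1

-- proof-side measure used only to pick a sufficient fuel: product of the value-list lengths
def pvM (d : PySem.Dict String (List Int)) : Nat := (d.values.map List.length).prod

-- literal transliteration of A's recursion; fuel 'pvM d + 1' strictly exceeds the recursion depth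
-- (each recursive call strictly decreases pvM), so on every input where Python A returns the fuel never runs out
def pvChunkA : Nat → PySem.Dict String (List Int) → Int → List (List (String × List Int))
  | 0, _, _ => []  -- fuel exhausted: unreachable under Pre_
  | Nat.succ f, d, mc =>
    let n := pvCombos d
    if n ≤ mc then [d.items]
    else
      match PySem.List.pyGet?
          (PySem.List.sorted d.keys (fun k => PySem.List.len (d.getD k [])) true) 0 with
      | none => []  -- sorted_keys[0] IndexError: unreachable under Pre_
      | some ck =>
        let vals := d.getD ck []
        let other := PySem.Int.floordiv n (PySem.List.len vals)
        let per := max 1 (PySem.Int.floordiv mc other)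
        (PySem.List.pyRange 0 (PySem.List.len vals) per).foldl
          (fun chunks i =>
            let sub := d.insert ck (PySem.List.slice vals (some i) (some (i + per)))
            if mc < pvCombos sub then chunks ++ pvChunkA f sub mc
            else chunks ++ [sub.items]) []

def chunk_grid_py (grid : List (String × List Int)) (max_combos : Int) : List (List (String × List Int)) :=
  pvChunkA (pvM (PySem.Dict.mk grid) + 1) (PySem.Dict.mk grid) max_combos

-- ===== PORT B =====
-- Source B's inner 'while rest:' loop cutting vals into per-sized pieces; fuel = the initial length of rest,
-- sufficient because each pass drops at least one element (per ≥ 1)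
def pvPieces : Nat → List Int → Int → List (List Int)
  | 0, _, _ => []
  | Nat.succ f, rest, per =>
    if rest.isEmpty then []
    else PySem.List.slice rest none (some per) ::
      pvPieces f (PySem.List.slice rest (some per) none) per

-- transliteration of B's outer while-loop: the worklist top is the list head
-- (stack.pop() takes the head, stack.append(x) is 'x :: ·'); fuel '3 ^ pvM + 1' bounds the number of pops
def pvLoopB : Nat → List (PySem.Dict String (List Int)) → List (List (String × List Int)) → Int → List (List (String × List Int))
  | _, [], out, _ => out
  | 0, _ :: _, out, _ => out  -- fuel exhausted: unreachable under Pre_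
  | Nat.succ f, g :: stack, out, mc =>
    let n := g.items.foldl (fun n kv => n * PySem.List.len kv.2) 1
    if n ≤ mc then pvLoopB f stack (out ++ [g.items]) mc
    else
      match PySem.List.pyGet? (PySem.List.sorted g.items (fun kv => PySem.List.len kv.2) true) 0 with
      | none => out  -- sorted(...)[0] IndexError: unreachable under Pre_
      | some (ck, vals) =>
        let per := max 1 (PySem.Int.floordiv mc (PySem.Int.floordiv n (PySem.List.len vals)))
        let pieces := pvPieces vals.length vals per
        pvLoopB f
          (pieces.reverse.foldl
            (fun w piece =>
              PySem.Dict.ofList (g.items.map (fun p => (p.1, if p.1 == ck then piece else p.2))) :: w)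
            stack)
          out mc

def chunk_grid_py_alt (grid : List (String × List Int)) (max_combos : Int) : List (List (String × List Int)) :=
  pvLoopB (3 ^ pvM (PySem.Dict.mk grid) + 1) [PySem.Dict.mk grid] [] max_combos

-- ===== PRECONDITION & SPEC =====
-- Pre_ excludes (a) association lists with duplicate keys, which cannot arise from a Python dict, and
-- (b) the inputs on which A never returns: with max_combos ≤ 0 and no empty value list A recurses forever
-- (RecursionError) or hits IndexError/ZeroDivisionError; A returns normally on exactly the admitted inputs.
def Pre_chunk_grid_py (grid : List (String × List Int)) (max_combos : Int) : Prop :=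
  (grid.map Prod.fst).Nodup ∧
    (1 ≤ max_combos ∨ (0 ≤ max_combos ∧ grid.any (fun p => p.2.isEmpty) = true))
instance (grid : List (String × List Int)) (max_combos : Int) : Decidable (Pre_chunk_grid_py grid max_combos) := by
  unfold Pre_chunk_grid_py; infer_instance

def pvWitness_chunk_grid_py : (List (String × List Int)) × Int := ([("a", [1, 2]), ("b", [3])], 1)

def Spec_chunk_grid_py (grid : List (String × List Int)) (max_combos : Int) (out : List (List (String × List Int))) : Prop := out = chunk_grid_py_alt grid max_combos
instance (grid : List (String × List Int)) (max_combos : Int) (out : List (List (String × List Int))) : Decidable (Spec_chunk_grid_py grid max_combos out) := by unfold Spec_chunk_grid_py; infer_instance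

-- ===== CLAIM (what is proved, stated in full; the proofs are below) =====
def Claim_equal_chunk_grid_py : Prop := ∀ (grid : List (String × List Int)) (max_combos : Int), Dom_chunk_grid_py grid max_combos → Pre_chunk_grid_py grid max_combos → Spec_chunk_grid_py grid max_combos (chunk_grid_py grid max_combos)

-- ===== LEMMAS AND PROOFS =====

-- A's result with the canonical sufficient fuel (proof-side name for the common value)
def pvChunkC (d : PySem.Dict String (List Int)) (mc : Int) : List (List (String × List Int)) :=
  pvChunkA (pvM d + 1) d mc

lemma pvCombos_foldl (l : List (List Int)) (a : Int) :
    l.foldl (fun n v => n * PySem.List.len v) a = a * ((l.map List.length).prod : Nat) := by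
  induction l generalizing a with
  | nil => simp
  | cons x xs ih =>
    rw [List.foldl_cons, ih]
    simp only [List.map_cons, List.prod_cons, PySem.List.len_eq]
    push_cast; ring

lemma pvCombos_eq (d : PySem.Dict String (List Int)) : pvCombos d = (pvM d : Int) := by
  unfold pvCombos pvM; rw [pvCombos_foldl]; ring

-- B's item-product loop computes the same number as A's value-product loop
lemma pvCombosB_eq (d : PySem.Dict String (List Int)) :
    d.items.foldl (fun n kv => n * PySem.List.len kv.2) 1 = pvCombos d := by
  unfold pvCombos
  simp only [PySem.Dict.values]
  rw [List.foldl_map]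

lemma pow3_add_le {a b : Nat} (ha : 1 ≤ a) (hb : 1 ≤ b) : 3 ^ a + 3 ^ b + 1 ≤ 3 ^ (a + b) := by
  have h3a : 3 ≤ 3 ^ a := by calc (3:Nat) = 3 ^ 1 := by norm_num
                                 _ ≤ 3 ^ a := Nat.pow_le_pow_right (by norm_num) ha
  have h3b : 3 ≤ 3 ^ b := by calc (3:Nat) = 3 ^ 1 := by norm_num
                                 _ ≤ 3 ^ b := Nat.pow_le_pow_right (by norm_num) hb
  have : 3 ^ (a + b) = 3 ^ a * 3 ^ b := pow_add 3 a b
  nlinarith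

lemma foldl_reverse_cons {α β : Type} (g : α → β) (l : List α) (st : List β) :
    (l.reverse).foldl (fun w i => g i :: w) st = l.map g ++ st := by
  rw [List.foldl_reverse]
  induction l with
  | nil => simp
  | cons x xs ih => simp [List.foldr_cons, ih]

lemma pyRange_pos_cons (a b s : Int) (hs : 0 < s) (h : a < b) :
    PySem.List.pyRange a b s = a :: PySem.List.pyRange (a + s) b s := by
  rw [PySem.List.pyRange_of_pos _ _ hs, PySem.List.pyRange_of_pos _ _ hs]
  have hdiv : (b - a + s - 1) / s = (b - a - 1) / s + 1 := by
    rw [show b - a + s - 1 = (b - a - 1) + 1 * s by ring, Int.add_mul_ediv_right _ _ (ne_of_gt hs)]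
  have hnn : 0 ≤ (b - a - 1) / s := Int.ediv_nonneg (by omega) (le_of_lt hs)
  rw [if_pos h, hdiv]
  have ht : ((b - a - 1) / s + 1).toNat = ((b - a - 1) / s).toNat + 1 := by omega
  rw [ht, List.range_succ_eq_map]
  by_cases h2 : a + s < b
  · rw [if_pos h2]
    have hdiv2 : (b - (a + s) + s - 1) / s = (b - a - 1) / s := by
      rw [show b - (a + s) + s - 1 = b - a - 1 by ring]
    rw [hdiv2]
    simp [List.map_map]
    intro k _; ring
  · rw [if_neg h2]
    have : (b - a - 1) / s = 0 := by
      apply Int.ediv_eq_zero_of_lt (by omega) (by omega)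
    rw [this]
    simp

lemma pyRange_pos_nil (a b s : Int) (hs : 0 < s) (h : b ≤ a) : PySem.List.pyRange a b s = [] := by
  rw [PySem.List.pyRange_of_pos _ _ hs, if_neg (by omega)]; simp

lemma pyRange_shift (a b s t : Int) (hs : 0 < s) :
    PySem.List.pyRange (a + t) (b + t) s = (PySem.List.pyRange a b s).map (· + t) := by
  rw [PySem.List.pyRange_of_pos _ _ hs, PySem.List.pyRange_of_pos _ _ hs]
  have he : b + t - (a + t) = b - a := by ring
  rw [he]
  by_cases h : a < b
  · rw [if_pos (by omega), if_pos h, List.map_map]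
    apply List.map_congr_left
    intro k _
    simp only [Function.comp_apply]
    ring
  · rw [if_neg (by omega), if_neg h]; simp

lemma slice_len_window (vals : List Int) (i per : Int) (h0 : 0 ≤ i) (hi : i < vals.length)
    (hper : 1 ≤ per) :
    (PySem.List.slice vals (some i) (some (i + per))).length
      = min (i + per).toNat vals.length - i.toNat := by
  rw [PySem.List.length_slice]
  have h1 : PySem.List.clampIdx vals.length i = min i.toNat vals.length := by
    rw [show i = ((i.toNat : Nat) : Int) by omega, PySem.List.clampIdx_natCast]; omega
  have h2 : PySem.List.clampIdx vals.length (i + per) = min (i + per).toNat vals.length := by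
    rw [show i + per = (((i + per).toNat : Nat) : Int) by omega, PySem.List.clampIdx_natCast]; omega
  rw [h1, h2]; omega

-- the window slice, shifted past a dropped prefix
lemma slice_drop_shift (vals : List Int) (j per : Int) (hj : 0 ≤ j) (hper : 1 ≤ per) :
    PySem.List.slice vals (some (j + per)) (some (j + per + per))
      = PySem.List.slice (vals.drop per.toNat) (some j) (some (j + per)) := by
  rw [PySem.List.slice_toNat vals (by omega) (by omega),
      PySem.List.slice_toNat (vals.drop per.toNat) hj (by omega)]
  rw [List.drop_drop]
  rw [show per.toNat + j.toNat = (j + per).toNat by omega,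
    show (j + per + per).toNat - (j + per).toNat = (j + per).toNat - j.toNat by omega]

-- B's while-loop pieces are exactly A's indexed window slices
lemma pvPieces_eq (per : Int) (hper : 1 ≤ per) : ∀ (m : Nat) (vals : List Int), vals.length ≤ m →
    pvPieces m vals per
      = (PySem.List.pyRange 0 (PySem.List.len vals) per).map
          (fun i => PySem.List.slice vals (some i) (some (i + per))) := by
  intro m
  induction m with
  | zero =>
    intro vals hm
    have : vals = [] := List.length_eq_zero_iff.mp (by omega)
    subst this
    simp only [pvPieces, PySem.List.len_eq, List.length_nil, Nat.cast_zero]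
    rw [pyRange_pos_nil 0 0 per (by omega) (le_refl 0)]
    rfl
  | succ f ih =>
    intro vals hm
    rcases vals with _ | ⟨x, xs⟩
    · simp only [pvPieces, List.isEmpty_nil, if_pos, PySem.List.len_eq, List.length_nil,
        Nat.cast_zero]
      rw [pyRange_pos_nil 0 0 per (by omega) (le_refl 0)]
      rfl
    · have hL : (0:Int) < ((x :: xs).length : Int) := by simp
      simp only [pvPieces, List.isEmpty_cons, if_neg, Bool.false_eq_true, not_false_eq_true]
      have hp1 : 1 ≤ per.toNat := by omega
      rw [PySem.List.slice_from _ (by omega : (0:Int) ≤ per)]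
      rw [ih _ (by rw [List.length_drop]; simp only [List.length_cons] at hm ⊢; omega)]
      simp only [PySem.List.len_eq]
      rw [pyRange_pos_cons 0 _ per (by omega) hL, List.map_cons]
      congr 1
      · rw [PySem.List.slice_to _ (by omega : (0:Int) ≤ per)]
        rw [show (0:Int) + per = per by ring,
          show PySem.List.slice (x :: xs) (some 0) (some per)
            = PySem.List.slice (x :: xs) none (some per) by
              exact PySem.List.slice_zero_start (x :: xs) (some per),
          PySem.List.slice_to _ (by omega : (0:Int) ≤ per)]
      · by_cases hcase : per < ((x :: xs).length : Int)
        · have hlen : (((x :: xs).drop per.toNat).length : Int) = ((x :: xs).length : Int) - per := by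
            rw [List.length_drop]; omega
          rw [hlen]
          rw [show (0:Int) + per = per by ring] at *
          have hsh := pyRange_shift 0 (((x :: xs).length : Int) - per) per per (by omega)
          rw [show (0:Int) + per = per by ring, show ((x :: xs).length : Int) - per + per
            = ((x :: xs).length : Int) by ring] at hsh
          rw [hsh, List.map_map]
          apply List.map_congr_left
          intro j hj
          rw [PySem.List.mem_pyRange_iff_of_pos (by omega)] at hj
          simp only [Function.comp_apply]
          exact (slice_drop_shift (x :: xs) j per (by omega) hper).symm
        · have hdnil : (x :: xs).drop per.toNat = [] := List.drop_eq_nil_of_le (by omega)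
          rw [hdnil]
          simp only [List.length_nil, Nat.cast_zero]
          rw [pyRange_pos_nil 0 0 per (by omega) (le_refl 0),
            pyRange_pos_nil (0 + per) _ per (by omega) (by omega)]
          rfl

-- stable insertion commutes with mapping the elements when the key factors through the map
lemma insertBy_map {α β : Type} (f : α → β) (bef : β → β → Bool) (x : α) (ys : List α) :
    PySem.List.insertBy bef (f x) (ys.map f)
      = (PySem.List.insertBy (fun a b => bef (f a) (f b)) x ys).map f := by
  induction ys with
  | nil => rfl
  | cons y t ih =>
    simp only [List.map_cons, PySem.List.insertBy]
    by_cases h : bef (f x) (f y)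
    · simp [h]
    · simp [h, ih]

lemma sorted_map_rev {α β κ : Type} [LT κ] [DecidableLT κ] (f : α → β) (key : β → κ)
    (xs : List α) :
    PySem.List.sorted (xs.map f) key true
      = (PySem.List.sorted xs (fun a => key (f a)) true).map f := by
  rw [PySem.List.sorted_rev_eq_foldl_insertBy, PySem.List.sorted_rev_eq_foldl_insertBy]
  suffices h : ∀ acc : List α,
      (xs.map f).foldl (fun acc x => PySem.List.insertBy (fun a b => decide (key b < key a)) x acc)
          (acc.map f)
        = (xs.foldl (fun acc x =>
            PySem.List.insertBy (fun a b => decide (key (f b) < key (f a))) x acc) acc).map f by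
    simpa using h []
  induction xs with
  | nil => intro acc; simp
  | cons x t ih =>
    intro acc
    simp only [List.map_cons, List.foldl_cons]
    rw [insertBy_map f (fun a b => decide (key b < key a)) x acc]
    exact ih _

-- the head of B's size-sorted item list is A's size-sorted head key with its value list
lemma sorted_items_head (d : PySem.Dict String (List Int)) (hnd : d.keys.Nodup)
    {ck : String} {rest : List String}
    (hs : PySem.List.sorted d.keys (fun k => PySem.List.len (d.getD k [])) true = ck :: rest) :
    PySem.List.sorted d.items (fun kv => PySem.List.len kv.2) true
      = (ck, d.getD ck []) :: rest.map (fun k => (k, d.getD k [])) := by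
  rw [PySem.Dict.items_eq_map_keys d hnd []]
  rw [sorted_map_rev (fun k => (k, d.getD k [])) (fun kv => PySem.List.len kv.2) d.keys]
  rw [hs, List.map_cons]

-- dict(pairs) over pairs with distinct keys is just that association list
lemma ofList_nodup_fst (l : List (String × List Int)) (h : (l.map Prod.fst).Nodup) :
    PySem.Dict.ofList l = PySem.Dict.mk l := by
  apply PySem.Dict.ext
  have hfresh := PySem.Dict.items_foldl_insert_fresh l Prod.fst Prod.snd PySem.Dict.empty
    (fun a _ => PySem.Dict.contains_empty _) h
  have : PySem.Dict.ofList l = l.foldl (fun d a => d.insert a.1 a.2) PySem.Dict.empty := rfl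
  rw [this, hfresh]
  have hemp : (PySem.Dict.empty : PySem.Dict String (List Int)).items = [] := rfl
  rw [hemp]
  simp

-- B's comprehension rebuild of the grid is A's in-place insert
lemma ofList_map_eq_insert (d : PySem.Dict String (List Int)) (hnd : d.keys.Nodup)
    (ck : String) (hc : d.contains ck = true) (v : List Int) :
    PySem.Dict.ofList (d.items.map (fun p => (p.1, if p.1 == ck then v else p.2)))
      = d.insert ck v := by
  have hmapeq : d.items.map (fun p => (p.1, if p.1 == ck then v else p.2))
      = (d.insert ck v).items := by
    rw [PySem.Dict.items_insert_of_contains d v hc]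
    apply List.map_congr_left
    intro p _
    by_cases h : (p.1 == ck) = true
    · have : p.1 = ck := by simpa using h
      simp [this]
    · simp [h]
  have hnodup : ((d.insert ck v).items.map Prod.fst).Nodup := by
    have hk : (d.insert ck v).keys.Nodup := by
      rw [PySem.Dict.keys_insert_of_contains d v hc]; exact hnd
    simpa [PySem.Dict.keys] using hk
  rw [hmapeq, ofList_nodup_fst _ hnodup]

lemma sum3_slices (vals : List Int) (P : Nat) (hP : 1 ≤ P) (per : Int) (hper : 1 ≤ per) :
    ∀ (fuel : Nat) (a : Int), ((vals.length : Int) - a).toNat ≤ fuel → 0 ≤ a → a < vals.length →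
    ((PySem.List.pyRange a (PySem.List.len vals) per).map
        (fun i => 3 ^ ((PySem.List.slice vals (some i) (some (i + per))).length * P))).sum
      + (if a + per < (vals.length : Int) then 1 else 0)
      ≤ 3 ^ ((((vals.length : Int)) - a).toNat * P) := by
  intro fuel
  induction fuel with
  | zero => intro a hf h0 ha; omega
  | succ f ih =>
    intro a hf h0 ha
    rw [PySem.List.len_eq, pyRange_pos_cons a _ per (by omega) ha, List.map_cons, List.sum_cons]
    rw [slice_len_window vals a per h0 ha hper]
    by_cases hnext : a + per < (vals.length : Int)
    · have hrec := ih (a + per) (by omega) (by omega) hnext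
      rw [PySem.List.len_eq] at hrec
      have hrest : ((PySem.List.pyRange (a + per) (vals.length : Int) per).map
          (fun i => 3 ^ ((PySem.List.slice vals (some i) (some (i + per))).length * P))).sum
          ≤ 3 ^ ((((vals.length : Int)) - (a + per)).toNat * P) := by
        split_ifs at hrec <;> omega
      have hmin : min (a + per).toNat vals.length - a.toNat = per.toNat := by omega
      rw [hmin, if_pos hnext]
      have h1 : 1 ≤ per.toNat * P := by
        have : 1 ≤ per.toNat := by omega
        exact Nat.one_le_iff_ne_zero.mpr (by positivity)
      have h2 : 1 ≤ (((vals.length : Int)) - (a + per)).toNat * P := by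
        have : 1 ≤ (((vals.length : Int)) - (a + per)).toNat := by omega
        exact Nat.one_le_iff_ne_zero.mpr (by positivity)
      have hsum : per.toNat * P + (((vals.length : Int)) - (a + per)).toNat * P
          = (((vals.length : Int)) - a).toNat * P := by
        rw [← Nat.add_mul]; congr 1; omega
      calc 3 ^ (per.toNat * P) + ((PySem.List.pyRange (a + per) (vals.length : Int) per).map
              (fun i => 3 ^ ((PySem.List.slice vals (some i) (some (i + per))).length * P))).sum + 1
          ≤ 3 ^ (per.toNat * P) + 3 ^ ((((vals.length : Int)) - (a + per)).toNat * P) + 1 := by omega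
        _ ≤ 3 ^ (per.toNat * P + (((vals.length : Int)) - (a + per)).toNat * P) := pow3_add_le h1 h2
        _ = _ := by rw [hsum]
    · rw [pyRange_pos_nil _ _ _ (by omega) (by omega), if_neg hnext]
      have hmin : min (a + per).toNat vals.length - a.toNat = (((vals.length : Int)) - a).toNat := by omega
      rw [hmin]; simp

lemma sorted_head_exists (d : PySem.Dict String (List Int)) (h : 2 ≤ pvM d) :
    ∃ ck rest, PySem.List.sorted d.keys (fun k => PySem.List.len (d.getD k [])) true = ck :: rest := by
  have hk : d.keys ≠ [] := by
    intro hnil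
    simp only [PySem.Dict.keys] at hnil
    have hitems := List.map_eq_nil_iff.mp hnil
    have hv : d.values = [] := by simp only [PySem.Dict.values, hitems]; rfl
    unfold pvM at h; rw [hv] at h; simp at h
  have hlen := PySem.List.length_sorted d.keys (fun k => PySem.List.len (d.getD k [])) true
  rcases hs : PySem.List.sorted d.keys (fun k => PySem.List.len (d.getD k [])) true with _ | ⟨ck, rest⟩
  · rw [hs] at hlen
    exact absurd (List.length_eq_zero_iff.mp hlen.symm) hk
  · exact ⟨ck, rest, rfl⟩

lemma natProd_le_one (l : List Nat) (h : ∀ x ∈ l, x ≤ 1) : l.prod ≤ 1 := by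
  induction l with
  | nil => simp
  | cons x xs ih =>
    rw [List.prod_cons]
    have := h x List.mem_cons_self
    have := ih (fun y hy => h y (List.mem_cons_of_mem _ hy))
    calc x * xs.prod ≤ 1 * 1 := Nat.mul_le_mul ‹x ≤ 1› ‹xs.prod ≤ 1›
      _ = 1 := by norm_num

lemma measure_insert (d : PySem.Dict String (List Int)) (hnd : d.keys.Nodup) {ck : String}
    (hmem : ck ∈ d.keys) :
    ∃ P : Nat, pvM d = (d.getD ck []).length * P ∧
      ∀ v : List Int, pvM (d.insert ck v) = v.length * P := by
  have hc : d.contains ck = true := (PySem.Dict.contains_iff_mem_keys d ck).mpr hmem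
  obtain ⟨p, hpmem, hp1⟩ : ∃ p ∈ d.items, p.1 = ck := by
    simp only [PySem.Dict.keys] at hmem
    simpa using hmem
  obtain ⟨l1, l2, hsplit⟩ := List.append_of_mem hpmem
  obtain ⟨w, hw⟩ : ∃ w, p = (ck, w) := ⟨p.2, by rw [← hp1]⟩
  subst hw
  have hnd' : ((l1.map (fun x => x.1)) ++ ck :: (l2.map (fun x => x.1))).Nodup := by
    have := hnd
    simp only [PySem.Dict.keys, hsplit, List.map_append, List.map_cons] at this
    exact this
  rcases List.nodup_append.mp hnd' with ⟨hn1, hn2, hdisj⟩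
  have hck2 : ck ∉ l2.map (fun x => x.1) := (List.nodup_cons.mp hn2).1
  have hck1 : ck ∉ l1.map (fun x => x.1) := by intro hin; exact hdisj ck hin ck List.mem_cons_self rfl
  have hgetD : d.getD ck [] = w := PySem.Dict.getD_of_mem_items d (by rw [hsplit]; exact List.mem_append_right _ List.mem_cons_self) hnd []
  have hins : ∀ v : List Int, (d.insert ck v).items = l1 ++ (ck, v) :: l2 := by
    intro v
    rw [PySem.Dict.items_insert_of_contains d v hc, hsplit]
    rw [List.map_append, List.map_cons]
    have e1 : l1.map (fun p => if (p.1 == ck) = true then (ck, v) else p) = l1 := by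
      rw [List.map_congr_left (g := id), List.map_id]
      intro q hq
      have : q.1 ≠ ck := fun he => hck1 (by rw [← he]; exact List.mem_map_of_mem hq)
      simp [this]
    have e2 : l2.map (fun p => if (p.1 == ck) = true then (ck, v) else p) = l2 := by
      rw [List.map_congr_left (g := id), List.map_id]
      intro q hq
      have : q.1 ≠ ck := fun he => hck2 (by rw [← he]; exact List.mem_map_of_mem hq)
      simp [this]
    rw [e1, e2]
    simp
  refine ⟨(l1.map (fun p => p.2.length)).prod * (l2.map (fun p => p.2.length)).prod, ?_, ?_⟩
  · unfold pvM
    simp only [PySem.Dict.values, hsplit, hgetD, List.map_append, List.map_cons,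
      List.prod_append, List.prod_cons, List.map_map, Function.comp_def]
    ring
  · intro v
    unfold pvM
    simp only [PySem.Dict.values, hins v, List.map_append, List.map_cons,
      List.prod_append, List.prod_cons, List.map_map, Function.comp_def]
    ring

lemma split_facts (d : PySem.Dict String (List Int)) (mc : Int) (hnd : d.keys.Nodup)
    (hmc : 1 ≤ mc) (hbig : mc < (pvM d : Int)) {ck : String} {rest : List String}
    (hsorted : PySem.List.sorted d.keys (fun k => PySem.List.len (d.getD k [])) true = ck :: rest) :
    ∃ P : Nat,
      1 ≤ P ∧
      2 ≤ (d.getD ck []).length ∧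
      pvM d = (d.getD ck []).length * P ∧
      PySem.Int.floordiv (pvCombos d) (PySem.List.len (d.getD ck [])) = (P : Int) ∧
      (1 ≤ max 1 (PySem.Int.floordiv mc (P : Int)) ∧
        max 1 (PySem.Int.floordiv mc (P : Int)) < ((d.getD ck []).length : Int)) ∧
      (∀ v : List Int, (d.insert ck v).keys = d.keys) ∧
      (∀ v : List Int, pvM (d.insert ck v) = v.length * P) := by
  have hM2 : 2 ≤ pvM d := by omega
  have hckmem : ck ∈ d.keys := by
    have : ck ∈ PySem.List.sorted d.keys (fun k => PySem.List.len (d.getD k [])) true := by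
      rw [hsorted]; exact List.mem_cons_self
    exact (PySem.List.mem_sorted _ _ _ _).mp this
  obtain ⟨P, hLP, hinsP⟩ := measure_insert d hnd hckmem
  set L := (d.getD ck []).length with hLdef
  have hmax : ∀ k ∈ d.keys, (d.getD k []).length ≤ L := by
    intro k hk
    have := PySem.List.key_head_sorted_rev_ge d.keys (fun k => PySem.List.len (d.getD k [])) hsorted k hk
    simp only [PySem.List.len_eq] at this
    exact_mod_cast this
  have hP1 : 1 ≤ P := by
    rcases Nat.eq_zero_or_pos P with h0 | h1
    · rw [h0, Nat.mul_zero] at hLP; omega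
    · exact h1
  have hL1 : 1 ≤ L := by
    rcases Nat.eq_zero_or_pos L with h0 | h1
    · rw [h0, Nat.zero_mul] at hLP; omega
    · exact h1
  have hL2 : 2 ≤ L := by
    by_contra hlt
    have hall : ∀ x ∈ d.values.map List.length, x ≤ 1 := by
      intro x hx
      obtain ⟨v, hv, hxv⟩ := List.mem_map.mp hx
      obtain ⟨k, hk, hkv⟩ : ∃ k ∈ d.keys, d.getD k [] = v := by
        have hvals := PySem.Dict.values_eq_map_keys d hnd []
        rw [hvals] at hv
        obtain ⟨k, hk, hkv⟩ := List.mem_map.mp hv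
        exact ⟨k, hk, hkv⟩
      have := hmax k hk
      rw [hkv] at this; omega
    have : pvM d ≤ 1 := natProd_le_one _ hall
    omega
  have hfd : PySem.Int.floordiv (pvCombos d) (PySem.List.len (d.getD ck [])) = (P : Int) := by
    rw [pvCombos_eq, PySem.List.len_eq, ← hLdef, hLP]
    rw [show ((L * P : Nat) : Int) = ((L * P : Nat) : Int) from rfl]
    rw [PySem.Int.floordiv_natCast (L * P) L]
    rw [Nat.mul_div_cancel_left P hL1]
  have hperL : max 1 (PySem.Int.floordiv mc (P : Int)) < (L : Int) := by
    have h1 : PySem.Int.floordiv mc (P : Int) < (L : Int) := by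
      rw [PySem.Int.floordiv_lt_iff_lt_mul (by exact_mod_cast hP1)]
      calc mc < (pvM d : Int) := hbig
        _ = (L : Int) * (P : Int) := by rw [hLP]; push_cast; ring
    have h2 : (1 : Int) < (L : Int) := by exact_mod_cast hL2
    omega
  have hkeys : ∀ v : List Int, (d.insert ck v).keys = d.keys := fun v =>
    PySem.Dict.keys_insert_of_contains d v ((PySem.Dict.contains_iff_mem_keys d ck).mpr hckmem)
  exact ⟨P, hP1, hL2, hLP, hfd, ⟨le_max_left _ _, hperL⟩, hkeys, hinsP⟩

lemma chunkC_small (d : PySem.Dict String (List Int)) (mc : Int) (h : pvCombos d ≤ mc) :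
    pvChunkC d mc = [d.items] := by
  unfold pvChunkC
  simp only [pvChunkA]
  rw [if_pos h]

lemma chunkA_fuel : ∀ (m : Nat) (d : PySem.Dict String (List Int)) (mc : Int) (f : Nat),
    d.keys.Nodup → (1 ≤ mc ∨ (pvM d : Int) ≤ mc) → pvM d ≤ m → pvM d < f →
    pvChunkA f d mc = pvChunkC d mc := by
  intro m
  induction m with
  | zero =>
    intro d mc f hnd hpre hm hf
    have h0 : pvM d = 0 := by omega
    have hsm : pvCombos d ≤ mc := by
      rw [pvCombos_eq, h0]
      rcases hpre with h | h
      · omega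
      · rw [h0] at h; exact h
    obtain ⟨f', rfl⟩ : ∃ f', f = f' + 1 := ⟨f - 1, by omega⟩
    rw [chunkC_small d mc hsm]
    simp only [pvChunkA]
    rw [if_pos hsm]
  | succ m ih =>
    intro d mc f hnd hpre hm hf
    obtain ⟨f', rfl⟩ : ∃ f', f = f' + 1 := ⟨f - 1, by omega⟩
    by_cases hsm : pvCombos d ≤ mc
    · rw [chunkC_small d mc hsm]
      simp only [pvChunkA]
      rw [if_pos hsm]
    · have hbig : mc < (pvM d : Int) := by rw [pvCombos_eq] at hsm; omega
      have hmc : 1 ≤ mc := by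
        rcases hpre with h | h
        · exact h
        · exact absurd (by rw [pvCombos_eq]; exact h) hsm
      have hM2 : 2 ≤ pvM d := by omega
      obtain ⟨ck, rest, hsorted⟩ := sorted_head_exists d hM2
      obtain ⟨P, hP1, hL2, hLP, hfd, ⟨hper1, hperL⟩, hkeys, hinsP⟩ :=
        split_facts d mc hnd hmc hbig hsorted
      unfold pvChunkC
      simp only [pvChunkA]
      rw [if_neg hsm, if_neg hsm, hsorted, PySem.List.pyGet?_zero_cons]
      simp only
      rw [hfd]
      apply PySem.List.foldl_congr_mem
      intro acc i hi
      rw [PySem.List.mem_pyRange_iff_of_pos (by omega)] at hi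
      obtain ⟨hi0, hiL, -⟩ := hi
      rw [PySem.List.len_eq] at hiL
      set per := max 1 (PySem.Int.floordiv mc (P : Int)) with hperdef
      set sub := d.insert ck (PySem.List.slice (d.getD ck []) (some i) (some (i + per))) with hsubdef
      have hsubM : pvM sub = (PySem.List.slice (d.getD ck []) (some i) (some (i + per))).length * P :=
        hinsP _
      have hslen := slice_len_window (d.getD ck []) i per hi0 hiL hper1
      have hsublt : pvM sub < pvM d := by
        rw [hsubM, hslen, hLP]
        have h1 : min (i + per).toNat (d.getD ck []).length - i.toNat < (d.getD ck []).length := by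
          omega
        exact Nat.mul_lt_mul_of_lt_of_le h1 (le_refl P) (by omega)
      have hndsub : sub.keys.Nodup := by rw [hsubdef, hkeys]; exact hnd
      by_cases hg : mc < pvCombos sub
      · rw [if_pos hg, if_pos hg]
        rw [ih sub mc f' hndsub (Or.inl hmc) (by omega) (by omega),
            ih sub mc (pvM d) hndsub (Or.inl hmc) (by omega) (by omega)]
      · rw [if_neg hg, if_neg hg]

lemma chunkC_split (d : PySem.Dict String (List Int)) (mc : Int) (hnd : d.keys.Nodup)
    (hmc : 1 ≤ mc) (hbig : mc < (pvM d : Int)) {ck : String} {rest : List String}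
    (hsorted : PySem.List.sorted d.keys (fun k => PySem.List.len (d.getD k [])) true = ck :: rest) :
    pvChunkC d mc =
      ((PySem.List.pyRange 0 (PySem.List.len (d.getD ck []))
          (max 1 (PySem.Int.floordiv mc
            (PySem.Int.floordiv (pvCombos d) (PySem.List.len (d.getD ck [])))))).map
        (fun i => pvChunkC (d.insert ck (PySem.List.slice (d.getD ck []) (some i)
          (some (i + max 1 (PySem.Int.floordiv mc
            (PySem.Int.floordiv (pvCombos d) (PySem.List.len (d.getD ck [])))))))) mc)).flatten := by
  obtain ⟨P, hP1, hL2, hLP, hfd, ⟨hper1, hperL⟩, hkeys, hinsP⟩ :=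
    split_facts d mc hnd hmc hbig hsorted
  have hsm : ¬ pvCombos d ≤ mc := by rw [pvCombos_eq]; omega
  rw [hfd]
  conv_lhs => rw [pvChunkC]
  simp only [pvChunkA]
  rw [if_neg hsm, hsorted, PySem.List.pyGet?_zero_cons]
  simp only
  rw [hfd]
  rw [← List.flatMap_def]
  rw [show (PySem.List.pyRange 0 (PySem.List.len (d.getD ck []))
        (max 1 (PySem.Int.floordiv mc (P : Int)))).flatMap
      (fun i => pvChunkC (d.insert ck (PySem.List.slice (d.getD ck []) (some i)
        (some (i + max 1 (PySem.Int.floordiv mc (P : Int)))))) mc)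
      = [] ++ (PySem.List.pyRange 0 (PySem.List.len (d.getD ck []))
        (max 1 (PySem.Int.floordiv mc (P : Int)))).flatMap
      (fun i => pvChunkC (d.insert ck (PySem.List.slice (d.getD ck []) (some i)
        (some (i + max 1 (PySem.Int.floordiv mc (P : Int)))))) mc) from (List.nil_append _).symm]
  rw [← PySem.List.foldl_append_eq_flatMap]
  apply PySem.List.foldl_congr_mem
  intro acc i hi
  rw [PySem.List.mem_pyRange_iff_of_pos (by omega)] at hi
  obtain ⟨hi0, hiL, -⟩ := hi
  rw [PySem.List.len_eq] at hiL
  set per := max 1 (PySem.Int.floordiv mc (P : Int)) with hperdef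
  set sub := d.insert ck (PySem.List.slice (d.getD ck []) (some i) (some (i + per))) with hsubdef
  have hslen := slice_len_window (d.getD ck []) i per hi0 hiL hper1
  have hsubM : pvM sub = (PySem.List.slice (d.getD ck []) (some i) (some (i + per))).length * P :=
    hinsP _
  have hsublt : pvM sub < pvM d := by
    rw [hsubM, hslen, hLP]
    exact Nat.mul_lt_mul_of_lt_of_le (by omega) (le_refl P) (by omega)
  have hndsub : sub.keys.Nodup := by rw [hsubdef, hkeys]; exact hnd
  by_cases hg : mc < pvCombos sub
  · rw [if_pos hg]
    rw [chunkA_fuel (pvM d) sub mc (pvM d) hndsub (Or.inl hmc) (by omega) (by omega)]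
  · rw [if_neg hg]
    rw [chunkC_small sub mc (by omega)]

lemma loopB_nil (f : Nat) (out : List (List (String × List Int))) (mc : Int) :
    pvLoopB f [] out mc = out := by
  cases f <;> rfl

lemma chain (mc : Int) : ∀ (cs : List (PySem.Dict String (List Int))),
    (∀ c ∈ cs, ∃ n, 1 ≤ n ∧ n ≤ 3 ^ pvM c ∧ ∀ (f : Nat) (st : List (PySem.Dict String (List Int))) out,
        pvLoopB (f + n) (c :: st) out mc = pvLoopB f st (out ++ pvChunkC c mc) mc) →
    ∃ N, N ≤ ((cs.map (fun c => 3 ^ pvM c)).sum) ∧ ∀ (f : Nat) (st : List (PySem.Dict String (List Int))) out,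
        pvLoopB (f + N) (cs ++ st) out mc
          = pvLoopB f st (out ++ (cs.map (fun c => pvChunkC c mc)).flatten) mc := by
  intro cs
  induction cs with
  | nil =>
    intro _
    exact ⟨0, by simp, fun f st out => by simp⟩
  | cons c cs' ih =>
    intro h
    obtain ⟨n, hn1, hnb, hstep⟩ := h c List.mem_cons_self
    obtain ⟨N', hN', hstep'⟩ := ih (fun c' hc' => h c' (List.mem_cons_of_mem _ hc'))
    refine ⟨n + N', ?_, ?_⟩
    · simp only [List.map_cons, List.sum_cons]; omega
    · intro f st out
      rw [show f + (n + N') = (f + N') + n by omega, List.cons_append]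
      rw [hstep (f + N') (cs' ++ st) out, hstep' f st (out ++ pvChunkC c mc)]
      simp [List.append_assoc]

lemma loopB_run : ∀ (m : Nat) (d : PySem.Dict String (List Int)) (mc : Int),
    d.keys.Nodup → (1 ≤ mc ∨ (pvM d : Int) ≤ mc) → pvM d ≤ m →
    ∃ n, 1 ≤ n ∧ n ≤ 3 ^ pvM d ∧ ∀ (f : Nat) (st : List (PySem.Dict String (List Int))) out,
        pvLoopB (f + n) (d :: st) out mc = pvLoopB f st (out ++ pvChunkC d mc) mc := by
  intro m
  induction m with
  | zero =>
    intro d mc hnd hpre hm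
    have h0 : pvM d = 0 := by omega
    have hsm : pvCombos d ≤ mc := by
      rw [pvCombos_eq, h0]
      rcases hpre with h | h
      · omega
      · rw [h0] at h; exact h
    refine ⟨1, le_refl 1, Nat.one_le_iff_ne_zero.mpr (by positivity), fun f st out => ?_⟩
    simp only [pvLoopB]
    rw [pvCombosB_eq, if_pos hsm, chunkC_small d mc hsm]
  | succ m ih =>
    intro d mc hnd hpre hm
    by_cases hsm : pvCombos d ≤ mc
    · refine ⟨1, le_refl 1, Nat.one_le_iff_ne_zero.mpr (by positivity), fun f st out => ?_⟩
      simp only [pvLoopB]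
      rw [pvCombosB_eq, if_pos hsm, chunkC_small d mc hsm]
    · have hbig : mc < (pvM d : Int) := by rw [pvCombos_eq] at hsm; omega
      have hmc : 1 ≤ mc := by
        rcases hpre with h | h
        · exact h
        · exact absurd (by rw [pvCombos_eq]; exact h) hsm
      have hM2 : 2 ≤ pvM d := by omega
      obtain ⟨ck, rest, hsorted⟩ := sorted_head_exists d hM2
      obtain ⟨P, hP1, hL2, hLP, hfd, ⟨hper1, hperL⟩, hkeys, hinsP⟩ :=
        split_facts d mc hnd hmc hbig hsorted
      have hckmem : ck ∈ d.keys := by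
        have : ck ∈ PySem.List.sorted d.keys (fun k => PySem.List.len (d.getD k [])) true := by
          rw [hsorted]; exact List.mem_cons_self
        exact (PySem.List.mem_sorted _ _ _ _).mp this
      have hc : d.contains ck = true := (PySem.Dict.contains_iff_mem_keys d ck).mpr hckmem
      set per := max 1 (PySem.Int.floordiv mc (P : Int)) with hperdef
      set cs := (PySem.List.pyRange 0 (PySem.List.len (d.getD ck [])) per).map
        (fun i => d.insert ck (PySem.List.slice (d.getD ck []) (some i) (some (i + per)))) with hcsdef
      have hchild : ∀ c ∈ cs, pvM c < pvM d ∧ c.keys.Nodup := by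
        intro c hc'
        obtain ⟨i, hi, rfl⟩ := List.mem_map.mp hc'
        have hi' := hi
        rw [PySem.List.mem_pyRange_iff_of_pos (by omega)] at hi'
        obtain ⟨hi0, hiL, -⟩ := hi'
        rw [PySem.List.len_eq] at hiL
        have hslen := slice_len_window (d.getD ck []) i per hi0 hiL hper1
        refine ⟨?_, by rw [hkeys]; exact hnd⟩
        rw [hinsP, hslen, hLP]
        exact Nat.mul_lt_mul_of_lt_of_le (by omega) (le_refl P) (by omega)
      obtain ⟨N, hNle, hNstep⟩ := chain mc cs (by
        intro c hc'
        obtain ⟨hlt, hndc⟩ := hchild c hc'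
        exact ih c mc hndc (Or.inl hmc) (by omega))
      have hsumb : (cs.map (fun c => 3 ^ pvM c)).sum + 1 ≤ 3 ^ pvM d := by
        have hmapeq : cs.map (fun c => 3 ^ pvM c)
            = (PySem.List.pyRange 0 (PySem.List.len (d.getD ck [])) per).map
              (fun i => 3 ^ ((PySem.List.slice (d.getD ck []) (some i) (some (i + per))).length * P)) := by
          rw [hcsdef, List.map_map]
          apply List.map_congr_left
          intro i _
          simp only [Function.comp_apply, hinsP]
        rw [hmapeq]
        have ha : (0:Int) < ((d.getD ck []).length : Int) := by omega
        have hf : (((d.getD ck []).length : Int) - 0).toNat ≤ (d.getD ck []).length := by omega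
        have hkey := sum3_slices (d.getD ck []) P hP1 per hper1 (d.getD ck []).length 0 hf (by omega) ha
        have hif : ((0:Int) + per < ((d.getD ck []).length : Int)) := by omega
        rw [if_pos hif] at hkey
        have hexp : ((((d.getD ck []).length : Int)) - 0).toNat * P = pvM d := by
          have ht : ((((d.getD ck []).length : Int)) - 0).toNat = (d.getD ck []).length := by omega
          rw [ht, hLP]
        rw [hexp] at hkey
        omega
      refine ⟨N + 1, by omega, by omega, fun f st out => ?_⟩
      rw [show f + (N + 1) = (f + N) + 1 by omega]
      simp only [pvLoopB]
      rw [pvCombosB_eq, if_neg hsm, sorted_items_head d hnd hsorted, PySem.List.pyGet?_zero_cons]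
      simp only
      rw [hfd, ← hperdef]
      rw [pvPieces_eq per hper1 (d.getD ck []).length (d.getD ck []) (le_refl _)]
      rw [foldl_reverse_cons
        (fun piece => PySem.Dict.ofList (d.items.map (fun p => (p.1, if p.1 == ck then piece else p.2))))
        _ st]
      rw [List.map_map]
      have hcseq : ((PySem.List.pyRange 0 (PySem.List.len (d.getD ck [])) per).map
          ((fun piece => PySem.Dict.ofList (d.items.map (fun p => (p.1, if p.1 == ck then piece else p.2))))
            ∘ (fun i => PySem.List.slice (d.getD ck []) (some i) (some (i + per))))) = cs := by
        rw [hcsdef]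
        apply List.map_congr_left
        intro i _
        simp only [Function.comp_apply]
        exact ofList_map_eq_insert d hnd ck hc _
      rw [hcseq, hNstep f st out]
      congr 1
      rw [List.append_right_inj]
      rw [chunkC_split d mc hnd hmc hbig hsorted, hfd, ← hperdef, hcsdef, List.map_map]
      rfl

-- ===== VERDICT (by name: the statement is the Claim_ definition above) =====
theorem chunk_grid_py_spec : Claim_equal_chunk_grid_py := by
  intro grid mc _ hpre
  unfold Spec_chunk_grid_py chunk_grid_py chunk_grid_py_alt
  obtain ⟨hndk, hcase⟩ := hpre
  have hnd : (PySem.Dict.mk grid).keys.Nodup := by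
    rw [PySem.Dict.keys_mk]; exact hndk
  have hdisj : 1 ≤ mc ∨ (pvM (PySem.Dict.mk grid) : Int) ≤ mc := by
    rcases hcase with h | ⟨h0, hany⟩
    · exact Or.inl h
    · right
      have hz : pvM (PySem.Dict.mk grid) = 0 := by
        obtain ⟨p, hp, hpe⟩ := List.any_eq_true.mp hany
        unfold pvM
        rw [PySem.Dict.values_mk]
        apply List.prod_eq_zero
        rw [List.map_map]
        exact List.mem_map.mpr ⟨p, hp, by simp [List.isEmpty_iff.mp hpe]⟩
      rw [hz]; simp; omega
  obtain ⟨n, hn1, hnle, hstep⟩ :=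
    loopB_run (pvM (PySem.Dict.mk grid)) (PySem.Dict.mk grid) mc hnd hdisj (le_refl _)
  rw [show 3 ^ pvM (PySem.Dict.mk grid) + 1 = (3 ^ pvM (PySem.Dict.mk grid) + 1 - n) + n by omega,
    hstep, loopB_nil, List.nil_append]
  rfl
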